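-- pv_equiv track=rewrite | github.com/honu-shell-utions/python | sandbox/project_euler/201-250/220_heighway_dragon03.py | dragon
-- ===== SOURCE A (Python) =====
-- def dragon(n):
--     if n == 0:
--         return ((0, 0), (0, 1))
--
--     (x, y), (u, v) = dragon(n//2)
--
--     if n % 2 == 0:
--         return ((x+y, y-x), (x+y, v-u))
--     else:
--         return ((x+y, v-u), (u+v, v-u))
-- ===== SOURCE B (Python) =====
-- def dragon(n):
--     state = ((0, 0), (0, 1))
--     for i in range(n.bit_length() - 1, -1, -1):
--         (x, y), (u, v) = state
--         if (n >> i) & 1 == 0: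
--             state = ((x + y, y - x), (x + y, v - u))
--         else:
--             state = ((x + y, v - u), (u + v, v - u))
--     return state
-- ===== Notes on version B (the rewrite author's own statement) =====
-- stated objective: alternative
-- what changed: Replaces the halving recursion with a single iterative MSB-to-LSB pass over n's binary digits, threading the point pair through one explicit loop.
import Mathlib
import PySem

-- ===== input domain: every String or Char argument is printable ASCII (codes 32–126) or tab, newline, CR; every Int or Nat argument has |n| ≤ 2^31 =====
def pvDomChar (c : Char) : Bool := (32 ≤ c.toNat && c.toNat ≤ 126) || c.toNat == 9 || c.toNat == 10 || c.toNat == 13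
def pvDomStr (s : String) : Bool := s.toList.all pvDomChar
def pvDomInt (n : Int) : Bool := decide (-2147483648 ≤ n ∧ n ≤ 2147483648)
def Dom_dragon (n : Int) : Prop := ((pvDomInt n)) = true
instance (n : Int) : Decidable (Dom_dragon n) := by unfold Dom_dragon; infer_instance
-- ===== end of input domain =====

-- B replaces A's halving recursion by one explicit MSB→LSB pass over n's binary digits (alternative decomposition, same cost).

-- ===== PORT A =====
-- A recurses on n//2; for n ≥ 0 this is Nat division, so the recursion is carried on a Nat
-- measure (for n < 0 the Python A never terminates — excluded by Pre_dragon).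
def dragonAux : Nat → (Int × Int) × (Int × Int)
  | 0 => ((0, 0), (0, 1))
  | (m + 1) =>
    let ((x, y), (u, v)) := dragonAux ((m + 1) / 2)
    if (m + 1) % 2 == 0 then ((x + y, y - x), (x + y, v - u))
    else ((x + y, v - u), (u + v, v - u))
  decreasing_by exact Nat.div_lt_self (Nat.succ_pos m) (by omega)

def dragon (n : Int) : (Int × Int) × (Int × Int) := dragonAux n.toNat

-- ===== PORT B =====
-- bits of n in LSB-first order (empty for 0), reversed to iterate MSB→LSB like Source B's range loop
def bitsLSB : Nat → List Bool
  | 0 => []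
  | (m + 1) => ((m + 1) % 2 == 1) :: bitsLSB ((m + 1) / 2)
  decreasing_by exact Nat.div_lt_self (Nat.succ_pos m) (by omega)

def dragonStep (s : (Int × Int) × (Int × Int)) (b : Bool) : (Int × Int) × (Int × Int) :=
  let ((x, y), (u, v)) := s
  if b then ((x + y, v - u), (u + v, v - u))
  else ((x + y, y - x), (x + y, v - u))

def dragon_alt (n : Int) : (Int × Int) × (Int × Int) :=
  (bitsLSB n.toNat).reverse.foldl dragonStep ((0, 0), (0, 1))

-- ===== PRECONDITION & SPEC =====
-- Pre_ excludes n < 0, where the Python A recurses forever (n//2 = -1 for -1) and raises RecursionError.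
def Pre_dragon (n : Int) : Prop := 0 ≤ n
instance (n : Int) : Decidable (Pre_dragon n) := by unfold Pre_dragon; infer_instance
def pvWitness_dragon : Int := 6

def Spec_dragon (n : Int) (out : (Int × Int) × (Int × Int)) : Prop := out = dragon_alt n
instance (n : Int) (out : (Int × Int) × (Int × Int)) : Decidable (Spec_dragon n out) := by unfold Spec_dragon; infer_instance

-- ===== CLAIM (what is proved, stated in full; the proofs are below) =====
def Claim_equal_dragon : Prop := ∀ (n : Int), Dom_dragon n → Pre_dragon n → Spec_dragon n (dragon n)

-- ===== LEMMAS AND PROOFS =====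
theorem dragonAux_eq_fold (m : Nat) :
    dragonAux m = (bitsLSB m).reverse.foldl dragonStep ((0, 0), (0, 1)) := by
  induction m using Nat.strong_induction_on with
  | _ m ih =>
    match m with
    | 0 => simp [dragonAux, bitsLSB]
    | (k + 1) =>
      rw [dragonAux, bitsLSB, List.reverse_cons, List.foldl_append,
        ← ih ((k + 1) / 2) (Nat.div_lt_self (Nat.succ_pos k) (by omega))]
      rcases h : dragonAux ((k + 1) / 2) with ⟨⟨x, y⟩, u, v⟩
      rcases Nat.even_or_odd (k + 1) with he | ho
      · have h2 : (k + 1) % 2 = 0 := Nat.even_iff.mp he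
        simp [dragonStep, h2]
      · have h2 : (k + 1) % 2 = 1 := Nat.odd_iff.mp ho
        simp [dragonStep, h2]

-- ===== VERDICT (by name: the statement is the Claim_ definition above) =====
theorem dragon_spec : Claim_equal_dragon := by
  intro n _ _
  show dragon n = dragon_alt n
  unfold dragon dragon_alt
  exact dragonAux_eq_fold n.toNat
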